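-- pv_equiv track=rewrite | github.com/omarmohamed2011/Lexicomp-Database | dosing_section.py | adult_injection
-- ===== SOURCE A (Python) =====
-- def adult_injection(disease_description):
--     Oral_adult, IV_adult, Rectal_adult = [], [], []
--
--     for dose in disease_description:
--
--         Oral_adult.append(''); IV_adult.append(''); Rectal_adult.append('')
--
--         for sub_dose in dose:
--             flag = 0
--
--             for elem in ['Oral', 'Oral, IV', 'IV, Oral']:
--                 if elem in sub_dose:
--                     flag = 1
--             if flag == 1:
--                 Oral_adult[-1] += sub_dose
--
--             flag = 0
--             for elem in ['Oral, IV', 'IV, Oral', 'IV']: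
--                 if elem in sub_dose:
--                     flag = 1
--             if flag == 1:
--                 IV_adult[-1] += sub_dose
--
--             if 'Rectal' in sub_dose:
--                 Rectal_adult[-1] += sub_dose
--
--     return Oral_adult, IV_adult, Rectal_adult
-- ===== SOURCE B (Python) =====
-- def adult_injection(disease_description):
--     Oral_adult = [''.join(sd for sd in dose if 'Oral' in sd) for dose in disease_description]
--     IV_adult = [''.join(sd for sd in dose if 'IV' in sd) for dose in disease_description]
--     Rectal_adult = [''.join(sd for sd in dose if 'Rectal' in sd) for dose in disease_description]
--     return Oral_adult, IV_adult, Rectal_adult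
-- ===== Notes on version B (the rewrite author's own statement) =====
-- stated objective: simpler
-- what changed: A's single interleaved pass with per-keyword flag loops and in-place mutation of the last list element is replaced by three independent filter-and-join comprehensions, one per category, exploiting that each keyword list collapses to a single substring test ('Oral', 'IV', 'Rectal').
import Mathlib
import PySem

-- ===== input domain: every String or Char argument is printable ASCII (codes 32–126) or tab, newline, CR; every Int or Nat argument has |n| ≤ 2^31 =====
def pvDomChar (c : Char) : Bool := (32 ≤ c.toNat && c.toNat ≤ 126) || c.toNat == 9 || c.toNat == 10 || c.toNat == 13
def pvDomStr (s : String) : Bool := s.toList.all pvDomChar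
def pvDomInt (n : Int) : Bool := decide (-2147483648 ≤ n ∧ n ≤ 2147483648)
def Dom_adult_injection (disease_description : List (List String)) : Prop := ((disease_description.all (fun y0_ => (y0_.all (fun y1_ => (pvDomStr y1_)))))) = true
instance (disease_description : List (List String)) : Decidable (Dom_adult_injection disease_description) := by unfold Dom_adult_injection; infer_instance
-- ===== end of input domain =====

-- B replaces A's one interleaved pass with flag loops by three independent filter-and-join passes (simpler decomposition; same behaviour because each of A's keyword lists collapses to a single substring test).

-- ===== PORT A =====
-- flag loop: flag = 0; for elem in keys: if elem in sub_dose: flag = 1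
def pvFlag (keys : List String) (sub : String) : Int :=
  keys.foldl (fun flag elem => if PySem.Str.isIn elem sub then 1 else flag) 0

-- xs[-1] += s  (xs is always nonempty at each call site in A)
def pvBumpLast (xs : List String) (s : String) : List String :=
  xs.dropLast ++ [xs.getLastD "" ++ s]

-- body of the inner loop: one sub_dose updates the triple of lists
def pvStep (st : List String × List String × List String) (sub : String) :
    List String × List String × List String :=
  let st1 := if pvFlag ["Oral", "Oral, IV", "IV, Oral"] sub = 1 then
               (pvBumpLast st.1 sub, st.2.1, st.2.2) else st
  let st2 := if pvFlag ["Oral, IV", "IV, Oral", "IV"] sub = 1 then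
               (st1.1, pvBumpLast st1.2.1 sub, st1.2.2) else st1
  if PySem.Str.isIn "Rectal" sub then (st2.1, st2.2.1, pvBumpLast st2.2.2 sub) else st2

-- the inner 'for sub_dose in dose' loop
def pvInner (st : List String × List String × List String) (dose : List String) :
    List String × List String × List String :=
  dose.foldl pvStep st

def adult_injection (disease_description : List (List String)) : List String × List String × List String :=
  disease_description.foldl
    (fun st dose => pvInner (st.1 ++ [""], st.2.1 ++ [""], st.2.2 ++ [""]) dose)
    ([], [], [])

-- ===== PORT B =====
-- ''.join(sd for sd in dose if key in sd)
def pvCat (key : String) (dose : List String) : String :=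
  PySem.Str.join "" (dose.filter (fun sd => PySem.Str.isIn key sd))

def adult_injection_alt (disease_description : List (List String)) : List String × List String × List String :=
  (disease_description.map (fun dose => pvCat "Oral" dose),
   disease_description.map (fun dose => pvCat "IV" dose),
   disease_description.map (fun dose => pvCat "Rectal" dose))

-- ===== PRECONDITION & SPEC =====
def Spec_adult_injection (disease_description : List (List String)) (out : List String × List String × List String) : Prop := out = adult_injection_alt disease_description
instance (disease_description : List (List String)) (out : List String × List String × List String) : Decidable (Spec_adult_injection disease_description out) := by unfold Spec_adult_injection; infer_instance

-- ===== CLAIM (what is proved, stated in full; the proofs are below) =====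
def Claim_equal_adult_injection : Prop := ∀ (disease_description : List (List String)), Dom_adult_injection disease_description → Spec_adult_injection disease_description (adult_injection disease_description)

-- ===== LEMMAS AND PROOFS =====

theorem isIn_of_isIn_of_infix {k k' : String} (s : String)
    (h : k.toList <:+: k'.toList) (hk : PySem.Str.isIn k' s = true) :
    PySem.Str.isIn k s = true := by
  rw [PySem.Str.isIn_iff_infix] at *
  exact h.trans hk

-- A's first keyword list collapses to the single test 'Oral' in sub
theorem flag_oral (sub : String) :
    (pvFlag ["Oral", "Oral, IV", "IV, Oral"] sub = 1) ↔ PySem.Str.isIn "Oral" sub = true := by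
  have i1 : PySem.Str.isIn "Oral, IV" sub = true → PySem.Str.isIn "Oral" sub = true :=
    isIn_of_isIn_of_infix sub (by decide)
  have i2 : PySem.Str.isIn "IV, Oral" sub = true → PySem.Str.isIn "Oral" sub = true :=
    isIn_of_isIn_of_infix sub (by decide)
  unfold pvFlag
  simp only [List.foldl_cons, List.foldl_nil]
  cases ho : PySem.Str.isIn "Oral" sub <;>
    cases ha : PySem.Str.isIn "Oral, IV" sub <;>
      cases hb : PySem.Str.isIn "IV, Oral" sub <;>
        simp_all

-- A's second keyword list collapses to the single test 'IV' in sub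
theorem flag_iv (sub : String) :
    (pvFlag ["Oral, IV", "IV, Oral", "IV"] sub = 1) ↔ PySem.Str.isIn "IV" sub = true := by
  have i1 : PySem.Str.isIn "Oral, IV" sub = true → PySem.Str.isIn "IV" sub = true :=
    isIn_of_isIn_of_infix sub (by decide)
  have i2 : PySem.Str.isIn "IV, Oral" sub = true → PySem.Str.isIn "IV" sub = true :=
    isIn_of_isIn_of_infix sub (by decide)
  unfold pvFlag
  simp only [List.foldl_cons, List.foldl_nil]
  cases ho : PySem.Str.isIn "IV" sub <;>
    cases ha : PySem.Str.isIn "Oral, IV" sub <;>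
      cases hb : PySem.Str.isIn "IV, Oral" sub <;>
        simp_all

theorem join_empty_nil : PySem.Str.join "" ([] : List String) = "" := by
  simp only [PySem.Str.join, List.map_nil]
  rfl

theorem charsJoin_empty_cons (l : List Char) (ls : List (List Char)) :
    PySem.Chars.join [] (l :: ls) = l ++ PySem.Chars.join [] ls := by
  cases ls with
  | nil => simp [PySem.Chars.join_singleton, PySem.Chars.join_nil]
  | cons m ms => rw [PySem.Chars.join_cons_cons]; simp

theorem join_empty_cons (x : String) (xs : List String) :
    PySem.Str.join "" (x :: xs) = x ++ PySem.Str.join "" xs := by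
  simp only [PySem.Str.join, List.map_cons]
  rw [show ("".toList) = ([] : List Char) from rfl, charsJoin_empty_cons,
      String.ofList_append, String.ofList_toList]

theorem pvCat_cons (key sub : String) (rest : List String) :
    pvCat key (sub :: rest) =
      (if PySem.Str.isIn key sub = true then sub else "") ++ pvCat key rest := by
  unfold pvCat
  simp only [PySem.Str.isIn_eq]
  by_cases h : PySem.Chars.isIn key.toList sub.toList = true
  · rw [if_pos h, List.filter_cons_of_pos (by simp [h]), join_empty_cons]
  · rw [if_neg h, List.filter_cons_of_neg (by simp [h]), String.empty_append]

theorem pvBumpLast_concat (xs : List String) (a s : String) :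
    pvBumpLast (xs ++ [a]) s = xs ++ [a ++ s] := by
  simp [pvBumpLast]

theorem pvStep_concat (O I R : List String) (a b c sub : String) :
    pvStep (O ++ [a], I ++ [b], R ++ [c]) sub =
    (O ++ [a ++ (if PySem.Str.isIn "Oral" sub = true then sub else "")],
     I ++ [b ++ (if PySem.Str.isIn "IV" sub = true then sub else "")],
     R ++ [c ++ (if PySem.Str.isIn "Rectal" sub = true then sub else "")]) := by
  unfold pvStep
  simp only [flag_oral, flag_iv]
  cases h1 : PySem.Str.isIn "Oral" sub <;>
    cases h2 : PySem.Str.isIn "IV" sub <;>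
      cases h3 : PySem.Str.isIn "Rectal" sub <;>
        simp [pvBumpLast_concat, String.append_empty]

theorem pvInner_concat (dose : List String) (O I R : List String) (a b c : String) :
    pvInner (O ++ [a], I ++ [b], R ++ [c]) dose =
      (O ++ [a ++ pvCat "Oral" dose], I ++ [b ++ pvCat "IV" dose], R ++ [c ++ pvCat "Rectal" dose]) := by
  induction dose generalizing a b c with
  | nil => simp [pvInner, pvCat, join_empty_nil]
  | cons sub rest ih =>
    unfold pvInner
    rw [List.foldl_cons, pvStep_concat O I R a b c sub]
    show pvInner _ rest = _
    rw [ih, pvCat_cons, pvCat_cons, pvCat_cons]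
    simp [String.append_assoc]

theorem outer_invariant (dd : List (List String)) (O I R : List String) :
    dd.foldl (fun st dose => pvInner (st.1 ++ [""], st.2.1 ++ [""], st.2.2 ++ [""]) dose) (O, I, R) =
      (O ++ dd.map (fun dose => pvCat "Oral" dose),
       I ++ dd.map (fun dose => pvCat "IV" dose),
       R ++ dd.map (fun dose => pvCat "Rectal" dose)) := by
  induction dd generalizing O I R with
  | nil => simp
  | cons dose rest ih =>
    rw [List.foldl_cons]
    show (rest.foldl _ (pvInner (O ++ [""], I ++ [""], R ++ [""]) dose)) = _
    rw [pvInner_concat, String.empty_append, String.empty_append, String.empty_append, ih]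
    simp

-- ===== VERDICT (by name: the statement is the Claim_ definition above) =====
theorem adult_injection_spec : Claim_equal_adult_injection := by
  intro dd _
  unfold Spec_adult_injection adult_injection adult_injection_alt
  rw [outer_invariant]
  simp
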